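-- pv_equiv track=rewrite | github.com/t3hc0nnect10n/Python_Basic | Module20/02_universal_prog_2/main.py | isNumber_O_sqrt_n
-- ===== SOURCE A (Python) =====
-- import math
--
-- def isNumber_O_sqrt_n(temp):
--
--
--     def isPrime_O_sqrt_n(n):
--         if n <= 1:
--             return False
--         for i in range(2, int(math.sqrt(n)) + 1):
--             if n % i == 0:
--                 return False
--         return True
--
--
--     list_prime = [i[1] for i in enumerate(temp) if isPrime_O_sqrt_n(i[0])]
--     return list_prime
-- ===== SOURCE B (Python) =====
-- def isNumber_O_sqrt_n(temp):
--     n = len(temp)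
--     sieve = [i >= 2 for i in range(n)]
--     for p in range(2, n):
--         for m in range(p * p, n, p):
--             sieve[m] = False
--     return [x for i, x in enumerate(temp) if sieve[i]]
-- ===== Notes on version B (the rewrite author's own statement) =====
-- stated objective: faster
-- what changed: Replaces per-index trial division up to sqrt(i) with a single sieve over range(len(temp)) that marks every multiple m >= p*p of every p, then one filtering pass.
import Mathlib
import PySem

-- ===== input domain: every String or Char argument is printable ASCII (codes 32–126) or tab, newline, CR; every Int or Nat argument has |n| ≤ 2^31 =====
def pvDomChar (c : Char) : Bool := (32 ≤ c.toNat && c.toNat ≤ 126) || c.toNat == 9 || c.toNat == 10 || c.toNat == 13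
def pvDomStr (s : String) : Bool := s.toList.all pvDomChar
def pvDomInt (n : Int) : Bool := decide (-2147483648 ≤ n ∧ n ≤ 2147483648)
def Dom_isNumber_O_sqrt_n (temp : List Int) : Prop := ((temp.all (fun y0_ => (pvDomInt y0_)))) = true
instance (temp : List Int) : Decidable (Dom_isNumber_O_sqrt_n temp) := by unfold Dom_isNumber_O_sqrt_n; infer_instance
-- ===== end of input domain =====

-- B replaces A's per-index trial division by one sieve pass over range(len(temp)); objective: faster.


-- ===== PORT A =====
-- isPrime_O_sqrt_n: 'int(math.sqrt(n))' is ported as Nat.sqrt; exact here since math.sqrt's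
-- float floor equals isqrt for all n ≤ 2^31, and n is a list index anyway.
-- The early-return loop 'for i in range(2, …): if n % i == 0: return False' is the .all fold.
def pvIsPrimeA (n : Int) : Bool :=
  if n ≤ 1 then false
  else (PySem.List.pyRange 2 ((n.toNat.sqrt : Int) + 1) 1).all
        (fun i => !(PySem.Int.mod n i == 0))

-- '[i[1] for i in enumerate(temp) if isPrime_O_sqrt_n(i[0])]'
def isNumber_O_sqrt_n (temp : List Int) : List Int :=
  ((PySem.List.enumerate temp 0).filter (fun q => pvIsPrimeA q.1)).map (·.2)

-- ===== PORT B =====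
-- 'sieve[m] = False' on an in-range nonnegative index m is List.set m.toNat;
-- 'sieve[i]' on the in-range index i from enumerate is pyGetD.
def isNumber_O_sqrt_n_alt (temp : List Int) : List Int :=
  let n : Int := temp.length
  let sieve0 : List Bool := (PySem.List.pyRange 0 n 1).map (fun i => decide (2 ≤ i))
  let sieve : List Bool :=
    (PySem.List.pyRange 2 n 1).foldl
      (fun s p =>
        (PySem.List.pyRange (p * p) n p).foldl (fun s m => s.set m.toNat false) s)
      sieve0
  ((PySem.List.enumerate temp 0).filter
      (fun q => PySem.List.pyGetD sieve q.1 false)).map (·.2)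

-- ===== PRECONDITION & SPEC =====
def Spec_isNumber_O_sqrt_n (temp : List Int) (out : List Int) : Prop := out = isNumber_O_sqrt_n_alt temp
instance (temp : List Int) (out : List Int) : Decidable (Spec_isNumber_O_sqrt_n temp out) := by unfold Spec_isNumber_O_sqrt_n; infer_instance

-- ===== CLAIM (what is proved, stated in full; the proofs are below) =====
def Claim_equal_isNumber_O_sqrt_n : Prop := ∀ (temp : List Int), Dom_isNumber_O_sqrt_n temp → Spec_isNumber_O_sqrt_n temp (isNumber_O_sqrt_n temp)

-- ===== LEMMAS AND PROOFS =====

-- Setting a list of nonnegative indices to false: position k becomes false exactly if ↑k is among them.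
theorem pv_getD_foldl_set (ms : List Int) (s : List Bool) (k : Nat)
    (hms : ∀ m ∈ ms, 0 ≤ m) (hk : k < s.length) :
    (ms.foldl (fun s m => s.set m.toNat false) s).getD k false
      = (s.getD k false && !(ms.contains (k : Int))) := by
  induction ms generalizing s with
  | nil => simp
  | cons m ms ih =>
    have hm : (0:Int) ≤ m := hms m (by simp)
    rw [List.foldl_cons, ih _ (fun x hx => hms x (by simp [hx])) (by simpa using hk)]
    have hset : (s.set m.toNat false).getD k false = (s.getD k false && !(m == (k : Int))) := by
      simp only [List.getD_eq_getElem?_getD, List.getElem?_set]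
      by_cases h : m.toNat = k
      · have : m = (k : Int) := by omega
        simp [this, hk]
      · have : ¬ m = (k : Int) := by omega
        simp [h, this]
    rw [hset]
    simp only [List.contains_cons, Bool.not_or, Bool.and_assoc]
    rw [show (m == (k:Int)) = ((k:Int) == m) from by simp [eq_comm]]

theorem pv_length_foldl_set (ms : List Int) (s : List Bool) :
    (ms.foldl (fun s m => s.set m.toNat false) s).length = s.length := by
  induction ms generalizing s with
  | nil => rfl
  | cons m ms ih => simp [List.foldl, ih]

theorem pv_getD_outer (ps : List Int) (n : Int) (s : List Bool) (k : Nat)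
    (hps : ∀ p ∈ ps, 2 ≤ p) (hk : k < s.length) :
    (ps.foldl (fun s p =>
        (PySem.List.pyRange (p * p) n p).foldl (fun s m => s.set m.toNat false) s) s).getD k false
      = (s.getD k false &&
          ps.all (fun p => !((PySem.List.pyRange (p * p) n p).contains (k : Int)))) := by
  induction ps generalizing s with
  | nil => simp
  | cons p ps ih =>
    have hp : (2:Int) ≤ p := hps p (by simp)
    have hnn : ∀ m ∈ PySem.List.pyRange (p * p) n p, (0:Int) ≤ m := by
      intro m hm
      have := (PySem.List.mem_pyRange_iff_of_pos (by omega) m).mp hm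
      nlinarith [this.1]
    rw [List.foldl_cons, ih _ (fun x hx => hps x (by simp [hx]))
        (by rw [pv_length_foldl_set]; exact hk),
      pv_getD_foldl_set _ _ _ hnn hk]
    simp [List.all_cons, Bool.and_assoc]

-- trial division agrees with Nat.Prime
theorem pv_isPrimeA_eq (k : Nat) : pvIsPrimeA (k : Int) = decide (Nat.Prime k) := by
  unfold pvIsPrimeA
  by_cases h1 : (k:Int) ≤ 1
  · have : ¬ Nat.Prime k := by
      intro hp; have := hp.two_le; omega
    simp [h1, this]
  · rw [if_neg h1]
    have h2 : 2 ≤ k := by omega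
    simp only [Int.toNat_natCast]
    rw [Bool.eq_iff_iff, List.all_eq_true, decide_eq_true_iff]
    rw [Nat.prime_def_le_sqrt]
    constructor
    · intro h
      refine ⟨h2, fun m hm hms hdvd => ?_⟩
      have hmem : (m:Int) ∈ PySem.List.pyRange 2 ((k.sqrt : Int) + 1) 1 := by
        rw [PySem.List.mem_pyRange_one]
        refine ⟨by exact_mod_cast hm, by omega⟩
      have := h _ hmem
      simp only [Bool.not_eq_eq_eq_not, Bool.not_true, beq_eq_false_iff_ne, ne_eq] at this
      rw [PySem.Int.mod_eq_zero_iff_dvd] at this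
      exact this (Int.natCast_dvd_natCast.mpr hdvd)
    · rintro ⟨-, h⟩ i hi
      rw [PySem.List.mem_pyRange_one] at hi
      simp only [Bool.not_eq_eq_eq_not, Bool.not_true, beq_eq_false_iff_ne, ne_eq]
      rw [PySem.Int.mod_eq_zero_iff_dvd]
      intro hdvd
      have hi2 : 2 ≤ i.toNat := by omega
      have his : i.toNat ≤ k.sqrt := by omega
      exact h i.toNat hi2 his (by rwa [← Int.natCast_dvd_natCast, Int.toNat_of_nonneg (by omega)])

-- sieve condition agrees with Nat.Prime for k < n
theorem pv_sieve_cond (n k : Nat) (hk : k < n) (h2 : 2 ≤ k) :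
    (PySem.List.pyRange 2 (n : Int) 1).all
        (fun p => !((PySem.List.pyRange (p * p) (n : Int) p).contains (k : Int)))
      = decide (Nat.Prime k) := by
  rw [Bool.eq_iff_iff, List.all_eq_true, decide_eq_true_iff, Nat.prime_def_le_sqrt]
  constructor
  · intro h
    refine ⟨h2, fun m hm hms hdvd => ?_⟩
    have hmk : m * m ≤ k := Nat.le_sqrt.mp hms
    have hmn : m < n := by nlinarith
    have hmem : (m:Int) ∈ PySem.List.pyRange 2 (n:Int) 1 := by
      rw [PySem.List.mem_pyRange_one]; exact ⟨by exact_mod_cast hm, by exact_mod_cast hmn⟩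
    have := h _ hmem
    simp only [Bool.not_eq_eq_eq_not, Bool.not_true, List.contains_eq_mem,
      decide_eq_false_iff_not] at this
    apply this
    rw [PySem.List.mem_pyRange_iff_of_pos (by exact_mod_cast Nat.lt_of_lt_of_le Nat.zero_lt_two hm)]
    refine ⟨by exact_mod_cast hmk, by exact_mod_cast hk, ?_⟩
    have : (m:Int) ∣ (k:Int) := Int.natCast_dvd_natCast.mpr hdvd
    exact Int.dvd_sub this (Dvd.intro m rfl)
  · rintro ⟨-, h⟩ p hp
    rw [PySem.List.mem_pyRange_one] at hp
    simp only [Bool.not_eq_eq_eq_not, Bool.not_true, List.contains_eq_mem, decide_eq_false_iff_not]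
    intro hmem
    rw [PySem.List.mem_pyRange_iff_of_pos (by omega)] at hmem
    obtain ⟨hpp, -, hdvd⟩ := hmem
    have hdk : p ∣ (k:Int) := by
      have : p ∣ (k:Int) - p * p + p * p := Int.dvd_add hdvd (Dvd.intro p rfl)
      simpa using this
    have hq : p.toNat ∣ k := by
      rwa [← Int.natCast_dvd_natCast, Int.toNat_of_nonneg (by omega)]
    have hqq : p.toNat * p.toNat ≤ k := by
      have : ((p.toNat : Int)) * p.toNat ≤ (k:Int) := by
        rw [Int.toNat_of_nonneg (by omega)]; omega
      exact_mod_cast this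
    exact h p.toNat (by omega) (Nat.le_sqrt.mpr hqq) hq

-- ===== VERDICT (by name: the statement is the Claim_ definition above) =====
theorem isNumber_O_sqrt_n_spec : Claim_equal_isNumber_O_sqrt_n := by
  intro temp _
  unfold Spec_isNumber_O_sqrt_n
  simp only [isNumber_O_sqrt_n, isNumber_O_sqrt_n_alt]
  congr 1
  apply List.filter_congr
  intro q hq
  rw [PySem.List.mem_enumerate_iff] at hq
  obtain ⟨k, hkl, rfl⟩ := hq
  simp only [zero_add]
  rw [PySem.List.pyGetD_natCast]
  have hlen0 : ((PySem.List.pyRange 0 (temp.length : Int) 1).map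
      (fun i => decide (2 ≤ i))).length = temp.length := by
    simp [PySem.List.length_pyRange_one]
  have hinit : ((PySem.List.pyRange 0 (temp.length : Int) 1).map
      (fun i => decide (2 ≤ i))).getD k false = decide (2 ≤ (k : Int)) := by
    rw [List.getD_eq_getElem?_getD,
      PySem.List.getElem?_map_pyRange_zero (fun i => decide (2 ≤ i)) temp.length k hkl]
    rfl
  rw [pv_getD_outer _ _ _ _ (fun p hp => (PySem.List.mem_pyRange_one.mp hp).1)
      (by rw [hlen0]; exact hkl), hinit]
  by_cases h2 : 2 ≤ k
  · rw [pv_sieve_cond temp.length k hkl h2, pv_isPrimeA_eq]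
    have : decide (2 ≤ (k : Int)) = true := by simp; omega
    rw [this, Bool.true_and]
  · have hnp : ¬ Nat.Prime k := fun hp => h2 hp.two_le
    have : decide (2 ≤ (k : Int)) = false := by simp; omega
    rw [pv_isPrimeA_eq, this, Bool.false_and, decide_eq_false hnp]
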